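-- pv_equiv track=rewrite | github.com/elorisraeli/pythonProject1 | Mechina-Classes/functions.py | rectangle
-- ===== SOURCE A (Python) =====
-- def rectangle(width, height):
--     line = ''
--     for i in range(width):
--         line += '*'
--     rectangle = ''
--     for x in range(height):
--         rectangle += f"{line}\n"
--     return rectangle
-- ===== SOURCE B (Python) =====
-- def rectangle(width, height):
--     return ('*' * width + '\n') * height
-- ===== Notes on version B (the rewrite author's own statement) =====
-- stated objective: simpler
-- what changed: Replaced the two character/line accumulation loops with a single closed-form string-repetition expression ('*' * width + ' ') * height.
import Mathlib
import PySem

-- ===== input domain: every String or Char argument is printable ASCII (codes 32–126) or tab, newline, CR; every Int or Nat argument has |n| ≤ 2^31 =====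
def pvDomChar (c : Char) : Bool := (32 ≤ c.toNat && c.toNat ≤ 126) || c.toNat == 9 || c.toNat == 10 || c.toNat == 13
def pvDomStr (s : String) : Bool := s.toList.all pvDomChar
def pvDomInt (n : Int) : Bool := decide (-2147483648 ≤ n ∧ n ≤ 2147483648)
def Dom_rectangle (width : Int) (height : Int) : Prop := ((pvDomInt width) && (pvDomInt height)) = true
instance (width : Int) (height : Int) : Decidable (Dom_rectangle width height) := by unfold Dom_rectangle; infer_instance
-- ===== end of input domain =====

-- B replaces A's two accumulation loops by one closed-form string-repetition expression (objective: simpler).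

-- ===== PORT A =====
def rectangle (width : Int) (height : Int) : String :=
  let line : String := (PySem.List.pyRange 0 width 1).foldl (fun s _ => s ++ "*") ""
  let rect : String := (PySem.List.pyRange 0 height 1).foldl (fun s _ => s ++ (line ++ "\n")) ""
  rect

-- ===== PORT B =====
-- Python's 's * n' on strings: n copies of s (empty for n ≤ 0); exact transcription of str.__mul__
def strMul (s : String) (n : Int) : String :=
  String.join (List.replicate n.toNat s)

def rectangle_alt (width : Int) (height : Int) : String :=
  strMul (strMul "*" width ++ "\n") height

-- ===== PRECONDITION & SPEC =====
def Spec_rectangle (width : Int) (height : Int) (out : String) : Prop := out = rectangle_alt width height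
instance (width : Int) (height : Int) (out : String) : Decidable (Spec_rectangle width height out) := by unfold Spec_rectangle; infer_instance

-- ===== CLAIM (what is proved, stated in full; the proofs are below) =====
def Claim_equal_rectangle : Prop := ∀ (width : Int) (height : Int), Dom_rectangle width height → Spec_rectangle width height (rectangle width height)

-- ===== LEMMAS AND PROOFS =====

-- ===== VERDICT (by name: the statement is the Claim_ definition above) =====
theorem foldl_append_init (l : List String) (init : String) :
    l.foldl (· ++ ·) init = init ++ l.foldl (· ++ ·) "" := by
  induction l generalizing init with
  | nil => simp
  | cons a l ih =>
    simp only [List.foldl]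
    rw [ih (init ++ a), ih ("" ++ a)]
    simp [String.append_assoc]

theorem join_cons (a : String) (l : List String) :
    String.join (a :: l) = a ++ String.join l := by
  simp only [String.join, List.foldl]
  rw [foldl_append_init l ("" ++ a)]
  simp

-- folding 's ++ t' over any list appends one copy of t per element
theorem foldl_append_const {α : Type} (l : List α) (t : String) (init : String) :
    l.foldl (fun s _ => s ++ t) init = init ++ String.join (List.replicate l.length t) := by
  induction l generalizing init with
  | nil => simp [String.join]
  | cons a l ih => simp [List.foldl, ih, List.replicate_succ, join_cons, String.append_assoc]

theorem rectangle_spec : Claim_equal_rectangle := by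
  intro width height _
  unfold Spec_rectangle rectangle rectangle_alt strMul
  simp only [foldl_append_const, PySem.List.length_pyRange_one, String.empty_append,
    Int.sub_zero]
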